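-- pv_equiv track=rewrite | github.com/ishanzo/movie-reco | app__/models/model.py | movie_recomendor_2
-- ===== SOURCE A (Python) =====
-- import collections
--
-- def movie_recomendor_2 (user_movies):
--     animated = ["The Incredibles", "Ratatouille", "Wreck-It Ralph", "Coraline","Tangled","Mulan"]
--     chick_flick = ["The Notebook","Mean Girls","The Proposal","She's the Man","Mis Congeniality"]
--     horror = ["It", "Annabelle Comes Home", "Pyscho","The Ring"]
--     mystery = ["Gone Girl", "Murder on the Orient Express","The Da Vinci Code", "Arrival"]
--     movie_lists = [animated,chick_flick,horror,mystery]
--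
--     category_freq = {}
--     #get frequency of user favourite movies in each movie list
--     for category in movie_lists:
--         freq = len(set(category) &  set(user_movies))
--         category_freq[tuple(category)] = freq
--     #order dictionary by most frequent movie list
--     category_freq = sorted(category_freq.items(), key=lambda kv: kv[1], reverse= True)
--     category_freq = collections.OrderedDict(category_freq)
--     #get most frequent movie list
--     user_movie_list = list(list(category_freq)[0])
--     #remove all movies in most frequent movie list that have already been seen
--     unseen_movies_list = [x for x in user_movie_list if x not in user_movies]
--     return unseen_movies_list
-- ===== SOURCE B (Python) =====
-- def movie_recomendor_2(user_movies):
--     animated = ["The Incredibles", "Ratatouille", "Wreck-It Ralph", "Coraline", "Tangled", "Mulan"]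
--     chick_flick = ["The Notebook", "Mean Girls", "The Proposal", "She's the Man", "Mis Congeniality"]
--     horror = ["It", "Annabelle Comes Home", "Pyscho", "The Ring"]
--     mystery = ["Gone Girl", "Murder on the Orient Express", "The Da Vinci Code", "Arrival"]
--     categories = [animated, chick_flick, horror, mystery]
--
--     # invert the data once: title -> index of its category (titles are unique across categories)
--     owner = {}
--     for idx, cat in enumerate(categories):
--         for title in cat:
--             owner[title] = idx
--     # count each DISTINCT favourite toward its category (duplicates in user_movies count once)
--     counts = {0: 0, 1: 0, 2: 0, 3: 0}
--     for m in dict.fromkeys(user_movies):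
--         if m in owner:
--             counts[owner[m]] += 1
--     # first category with the strictly highest count wins (matches A's stable sort tie-break)
--     best = 0
--     for i in (1, 2, 3):
--         if counts[i] > counts[best]:
--             best = i
--     seen = set(user_movies)
--     return [x for x in categories[best] if x not in seen]
-- ===== Notes on version B (the rewrite author's own statement) =====
-- stated objective: alternative
-- what changed: Inverts the catalogue once into a title-to-category-index dict and counts each distinct user movie toward its category in one pass, then picks the first index with the strictly highest count - replacing A's four per-category set intersections (each rebuilding set(user_movies)), frequency dict keyed by tuples, stable descending sort and OrderedDict.
import Mathlib
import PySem

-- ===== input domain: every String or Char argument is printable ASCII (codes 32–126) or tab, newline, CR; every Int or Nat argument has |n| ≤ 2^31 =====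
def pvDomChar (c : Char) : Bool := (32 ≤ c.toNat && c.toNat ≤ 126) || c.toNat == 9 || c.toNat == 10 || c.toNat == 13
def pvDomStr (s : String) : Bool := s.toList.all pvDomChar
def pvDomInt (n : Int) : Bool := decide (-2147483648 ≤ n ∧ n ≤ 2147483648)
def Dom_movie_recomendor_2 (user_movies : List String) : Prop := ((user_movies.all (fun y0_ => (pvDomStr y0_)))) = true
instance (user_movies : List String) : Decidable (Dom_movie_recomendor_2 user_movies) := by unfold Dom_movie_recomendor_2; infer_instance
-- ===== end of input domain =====

-- B inverts the catalogue once into a title→category-index dict and counts each distinct user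
-- movie toward its category, then takes the first index with the strictly highest count — no
-- per-category set intersections, no sort, no OrderedDict: a different decomposition, same result.

-- ===== PORT A =====
def movie_recomendor_2 (user_movies : List String) : List String :=
  let animated : List String := ["The Incredibles", "Ratatouille", "Wreck-It Ralph", "Coraline", "Tangled", "Mulan"]
  let chick_flick : List String := ["The Notebook", "Mean Girls", "The Proposal", "She's the Man", "Mis Congeniality"]
  let horror : List String := ["It", "Annabelle Comes Home", "Pyscho", "The Ring"]
  let mystery : List String := ["Gone Girl", "Murder on the Orient Express", "The Da Vinci Code", "Arrival"]
  let movie_lists : List (List String) := [animated, chick_flick, horror, mystery]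
  -- for category in movie_lists: category_freq[tuple(category)] = len(set(category) & set(user_movies))
  -- (the Python tuple key 'tuple(category)' is ported as the List String itself)
  let category_freq : PySem.Dict (List String) Int :=
    movie_lists.foldl (fun d category =>
      d.insert category (PySem.Set.len (PySem.Set.inter (PySem.Set.ofList category) (PySem.Set.ofList user_movies)))) PySem.Dict.empty
  -- category_freq = sorted(category_freq.items(), key=lambda kv: kv[1], reverse=True); OrderedDict keeps that order
  let sorted_items := PySem.List.sorted category_freq.items (fun kv => kv.2) true
  -- user_movie_list = list(list(category_freq)[0]); the dict always holds the 4 categories, so [0] never raises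
  let user_movie_list : List String := (sorted_items.map Prod.fst).headD []
  -- [x for x in user_movie_list if x not in user_movies]
  user_movie_list.filter (fun x => !(user_movies.contains x))

-- ===== PORT B =====
def movie_recomendor_2_alt (user_movies : List String) : List String :=
  let animated : List String := ["The Incredibles", "Ratatouille", "Wreck-It Ralph", "Coraline", "Tangled", "Mulan"]
  let chick_flick : List String := ["The Notebook", "Mean Girls", "The Proposal", "She's the Man", "Mis Congeniality"]
  let horror : List String := ["It", "Annabelle Comes Home", "Pyscho", "The Ring"]
  let mystery : List String := ["Gone Girl", "Murder on the Orient Express", "The Da Vinci Code", "Arrival"]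
  let categories : List (List String) := [animated, chick_flick, horror, mystery]
  -- owner = {}; for idx, cat in enumerate(categories): for title in cat: owner[title] = idx
  let owner : PySem.Dict String Int :=
    (PySem.List.enumerate categories).foldl
      (fun d p => p.2.foldl (fun d title => d.insert title p.1) d) PySem.Dict.empty
  -- counts = {0:0, 1:0, 2:0, 3:0}; for m in dict.fromkeys(user_movies): if m in owner: counts[owner[m]] += 1
  -- (owner's values are exactly counts' keys 0..3, so Python's counts[owner[m]] never raises; insert overwrites in place)
  let counts : PySem.Dict Int Int :=
    (PySem.List.dedup user_movies).foldl
      (fun c m => match owner.get? m with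
        | some i => c.insert i (c.getD i 0 + 1)
        | none => c)
      (PySem.Dict.ofList [(0, 0), (1, 0), (2, 0), (3, 0)])
  -- best = 0; for i in (1, 2, 3): if counts[i] > counts[best]: best = i
  let best : Int := [1, 2, 3].foldl (fun b i => if counts.getD b 0 < counts.getD i 0 then i else b) 0
  -- seen = set(user_movies); [x for x in categories[best] if x not in seen]  (best is always 0..3, so categories[best] never raises)
  let seen : PySem.Set String := PySem.Set.ofList user_movies
  (PySem.List.pyGetD categories best []).filter (fun x => !(PySem.Set.contains seen x))

-- ===== PRECONDITION & SPEC =====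
def Spec_movie_recomendor_2 (user_movies : List String) (out : List String) : Prop := out = movie_recomendor_2_alt user_movies
instance (user_movies : List String) (out : List String) : Decidable (Spec_movie_recomendor_2 user_movies out) := by unfold Spec_movie_recomendor_2; infer_instance

-- ===== CLAIM (what is proved, stated in full; the proofs are below) =====
def Claim_equal_movie_recomendor_2 : Prop := ∀ (user_movies : List String), Dom_movie_recomendor_2 user_movies → Spec_movie_recomendor_2 user_movies (movie_recomendor_2 user_movies)

-- ===== LEMMAS AND PROOFS =====

-- proof-only names for the four category literals, the frequency A computes, and B's owner dict and counting step
def pvCatA : List String := ["The Incredibles", "Ratatouille", "Wreck-It Ralph", "Coraline", "Tangled", "Mulan"]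
def pvCatC : List String := ["The Notebook", "Mean Girls", "The Proposal", "She's the Man", "Mis Congeniality"]
def pvCatH : List String := ["It", "Annabelle Comes Home", "Pyscho", "The Ring"]
def pvCatM : List String := ["Gone Girl", "Murder on the Orient Express", "The Da Vinci Code", "Arrival"]
def pvFreq (user_movies : List String) (category : List String) : Int :=
  PySem.Set.len (PySem.Set.inter (PySem.Set.ofList category) (PySem.Set.ofList user_movies))
def pvOwner : PySem.Dict String Int :=
  (PySem.List.enumerate [pvCatA, pvCatC, pvCatH, pvCatM]).foldl
    (fun d p => p.2.foldl (fun d title => d.insert title p.1) d) PySem.Dict.empty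
def pvStep (c : PySem.Dict Int Int) (m : String) : PySem.Dict Int Int :=
  match pvOwner.get? m with
  | some i => c.insert i (c.getD i 0 + 1)
  | none => c

-- the owner dict, evaluated
lemma pvOwner_eq : pvOwner = PySem.Dict.mk [("The Incredibles", 0), ("Ratatouille", 0), ("Wreck-It Ralph", 0), ("Coraline", 0), ("Tangled", 0), ("Mulan", 0), ("The Notebook", 1), ("Mean Girls", 1), ("The Proposal", 1), ("She's the Man", 1), ("Mis Congeniality", 1), ("It", 2), ("Annabelle Comes Home", 2), ("Pyscho", 2), ("The Ring", 2), ("Gone Girl", 3), ("Murder on the Orient Express", 3), ("The Da Vinci Code", 3), ("Arrival", 3)] := by rfl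

-- pointwise: looking up m in owner and comparing with index i is membership in category i
lemma pvOwner_mem (m : String) (j : Int) :
    pvOwner.get? m = some j ↔ (m, j) ∈ pvOwner.items :=
  PySem.Dict.get?_eq_some_iff_mem_items pvOwner m j (by rw [pvOwner_eq]; decide)

lemma pvOwner_p0 (m : String) : (pvOwner.get? m == some 0) = pvCatA.contains m := by
  rw [Bool.eq_iff_iff, beq_iff_eq, List.contains_iff_mem, pvOwner_mem, pvOwner_eq]
  simp [pvCatA]
lemma pvOwner_p1 (m : String) : (pvOwner.get? m == some 1) = pvCatC.contains m := by
  rw [Bool.eq_iff_iff, beq_iff_eq, List.contains_iff_mem, pvOwner_mem, pvOwner_eq]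
  simp [pvCatC]
lemma pvOwner_p2 (m : String) : (pvOwner.get? m == some 2) = pvCatH.contains m := by
  rw [Bool.eq_iff_iff, beq_iff_eq, List.contains_iff_mem, pvOwner_mem, pvOwner_eq]
  simp [pvCatH]
lemma pvOwner_p3 (m : String) : (pvOwner.get? m == some 3) = pvCatM.contains m := by
  rw [Bool.eq_iff_iff, beq_iff_eq, List.contains_iff_mem, pvOwner_mem, pvOwner_eq]
  simp [pvCatM]

-- every value stored in owner is one of the four indices
lemma pvOwner_values (m : String) (j : Int) (h : pvOwner.get? m = some j) :
    j = 0 ∨ j = 1 ∨ j = 2 ∨ j = 3 := by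
  rw [pvOwner_mem, pvOwner_eq] at h
  simp only [List.mem_cons, List.not_mem_nil, or_false] at h
  rcases h with h | h | h | h | h | h | h | h | h | h | h | h | h | h | h | h | h | h | h <;>
    simp_all

-- B's counting loop, characterised: each slot accumulates the number of list elements owned by it
lemma pvCountsFold (l : List String) (v0 v1 v2 v3 : Int) :
    l.foldl pvStep (PySem.Dict.mk [(0, v0), (1, v1), (2, v2), (3, v3)]) =
    PySem.Dict.mk [(0, v0 + (l.countP (fun m => pvOwner.get? m == some 0) : Int)),
                   (1, v1 + (l.countP (fun m => pvOwner.get? m == some 1) : Int)),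
                   (2, v2 + (l.countP (fun m => pvOwner.get? m == some 2) : Int)),
                   (3, v3 + (l.countP (fun m => pvOwner.get? m == some 3) : Int))] := by
  induction l generalizing v0 v1 v2 v3 with
  | nil => simp
  | cons x t ih =>
    simp only [List.foldl]
    rcases hx : pvOwner.get? x with _ | j
    · have hstep : pvStep (PySem.Dict.mk [(0, v0), (1, v1), (2, v2), (3, v3)]) x
          = PySem.Dict.mk [(0, v0), (1, v1), (2, v2), (3, v3)] := by unfold pvStep; rw [hx]
      rw [hstep, ih]
      simp [hx]
    · have hj := pvOwner_values x j hx
      rcases hj with rfl | rfl | rfl | rfl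
      · have hstep : pvStep (PySem.Dict.mk [(0, v0), (1, v1), (2, v2), (3, v3)]) x
            = PySem.Dict.mk [(0, v0 + 1), (1, v1), (2, v2), (3, v3)] := by
          unfold pvStep; rw [hx]; rfl
        rw [hstep, ih]
        simp [hx]
        omega
      · have hstep : pvStep (PySem.Dict.mk [(0, v0), (1, v1), (2, v2), (3, v3)]) x
            = PySem.Dict.mk [(0, v0), (1, v1 + 1), (2, v2), (3, v3)] := by
          unfold pvStep; rw [hx]; rfl
        rw [hstep, ih]
        simp [hx]
        omega
      · have hstep : pvStep (PySem.Dict.mk [(0, v0), (1, v1), (2, v2), (3, v3)]) x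
            = PySem.Dict.mk [(0, v0), (1, v1), (2, v2 + 1), (3, v3)] := by
          unfold pvStep; rw [hx]; rfl
        rw [hstep, ih]
        simp [hx]
        omega
      · have hstep : pvStep (PySem.Dict.mk [(0, v0), (1, v1), (2, v2), (3, v3)]) x
            = PySem.Dict.mk [(0, v0), (1, v1), (2, v2), (3, v3 + 1)] := by
          unfold pvStep; rw [hx]; rfl
        rw [hstep, ih]
        simp [hx]
        omega
-- two counts of the same intersection: distinct user movies lying in cat = cat's titles lying in user_movies
lemma pvCount_eq_freq (um cat : List String) :
    (((PySem.List.dedup um).countP (fun m => cat.contains m) : Nat) : Int) = pvFreq um cat := by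
  unfold pvFreq
  rw [List.countP_eq_length_filter, PySem.List.dedup_eq_ofList]
  show (((PySem.Set.ofList um).filter (fun m => cat.contains m)).length : Int)
      = (((PySem.Set.ofList cat).filter (fun x => PySem.Set.contains (PySem.Set.ofList um) x)).length : Int)
  have hperm : ((PySem.Set.ofList um).filter (fun m => cat.contains m)).Perm
      ((PySem.Set.ofList cat).filter (fun x => PySem.Set.contains (PySem.Set.ofList um) x)) := by
    rw [List.perm_ext_iff_of_nodup
      ((PySem.Set.nodup_ofList um).filter _) ((PySem.Set.nodup_ofList cat).filter _)]
    intro a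
    simp only [List.mem_filter, PySem.Set.mem_ofList, PySem.Set.contains_eq_listContains,
      List.contains_iff_mem]
    tauto
  rw [hperm.length_eq]

-- head of A's stable descending sort of the four keyed pairs = B's first-strict-max index pick
set_option maxHeartbeats 2000000 in
lemma pvHead_sorted_eq_pick (a c h m : List String) (f0 f1 f2 f3 : Int) :
    ((PySem.List.sorted [(a, f0), (c, f1), (h, f2), (m, f3)] (fun kv => kv.2) true).map Prod.fst).headD []
      = PySem.List.pyGetD [a, c, h, m]
          ([1, 2, 3].foldl (fun b i =>
             if (PySem.Dict.mk [((0 : Int), f0), (1, f1), (2, f2), (3, f3)]).getD b 0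
                < (PySem.Dict.mk [((0 : Int), f0), (1, f1), (2, f2), (3, f3)]).getD i 0
             then i else b) (0 : Int)) [] := by
  rw [PySem.List.sorted_rev_eq_foldl_insertBy]
  simp only [List.foldl]
  by_cases h1 : f0 < f1 <;> by_cases h2 : f0 < f2 <;> by_cases h3 : f1 < f2 <;>
  by_cases h4 : f0 < f3 <;> by_cases h5 : f1 < f3 <;> by_cases h6 : f2 < f3 <;>
    simp [PySem.List.insertBy, PySem.List.pyGetD,
      PySem.Dict.getD_eq_get?_getD, PySem.Dict.get?_mk_cons, h1, h2, h3, h4, h5, h6]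

-- ===== VERDICT (by name: the statement is the Claim_ definition above) =====
set_option maxHeartbeats 2000000 in
theorem movie_recomendor_2_spec : Claim_equal_movie_recomendor_2 := by
  intro um _
  unfold Spec_movie_recomendor_2
  show (((PySem.List.sorted
        [(pvCatA, pvFreq um pvCatA), (pvCatC, pvFreq um pvCatC),
         (pvCatH, pvFreq um pvCatH), (pvCatM, pvFreq um pvCatM)]
        (fun kv => kv.2) true).map Prod.fst).headD []).filter (fun x => !(um.contains x))
    = (PySem.List.pyGetD [pvCatA, pvCatC, pvCatH, pvCatM]
        ([1, 2, 3].foldl (fun b i =>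
          if ((PySem.List.dedup um).foldl pvStep (PySem.Dict.mk [(0, 0), (1, 0), (2, 0), (3, 0)])).getD b 0
             < ((PySem.List.dedup um).foldl pvStep (PySem.Dict.mk [(0, 0), (1, 0), (2, 0), (3, 0)])).getD i 0
          then i else b) (0 : Int)) []).filter (fun x => !(PySem.Set.contains (PySem.Set.ofList um) x))
  have e0 : pvFreq um pvCatA = ((PySem.List.dedup um).countP (fun m => pvOwner.get? m == some 0) : Int) := by
    rw [funext pvOwner_p0]; exact (pvCount_eq_freq um pvCatA).symm
  have e1 : pvFreq um pvCatC = ((PySem.List.dedup um).countP (fun m => pvOwner.get? m == some 1) : Int) := by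
    rw [funext pvOwner_p1]; exact (pvCount_eq_freq um pvCatC).symm
  have e2 : pvFreq um pvCatH = ((PySem.List.dedup um).countP (fun m => pvOwner.get? m == some 2) : Int) := by
    rw [funext pvOwner_p2]; exact (pvCount_eq_freq um pvCatH).symm
  have e3 : pvFreq um pvCatM = ((PySem.List.dedup um).countP (fun m => pvOwner.get? m == some 3) : Int) := by
    rw [funext pvOwner_p3]; exact (pvCount_eq_freq um pvCatM).symm
  rw [pvCountsFold, e0, e1, e2, e3]
  simp only [zero_add]
  generalize ((PySem.List.dedup um).countP (fun m => pvOwner.get? m == some 0) : Int) = k0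
  generalize ((PySem.List.dedup um).countP (fun m => pvOwner.get? m == some 1) : Int) = k1
  generalize ((PySem.List.dedup um).countP (fun m => pvOwner.get? m == some 2) : Int) = k2
  generalize ((PySem.List.dedup um).countP (fun m => pvOwner.get? m == some 3) : Int) = k3
  rw [pvHead_sorted_eq_pick]
  refine List.filter_congr ?_
  intro x _
  simp [PySem.Set.contains_eq_listContains]
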